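-- pv_equiv track=rewrite | github.com/hoshikawaTenma/SEC-Filing-RAG-system | packages/core/pipeline.py | _looks_numeric
-- ===== SOURCE A (Python) =====
-- def _looks_numeric(text: str) -> bool:
--     if not text:
--         return False
--     digits = sum(ch.isdigit() for ch in text)
--     if digits >= 20:
--         return True
--     if "$" in text or "%" in text:
--         return True
--     return False
-- ===== SOURCE B (Python) =====
-- def _looks_numeric(text: str) -> bool:
--     if not text:
--         return False
--     digits = 0
--     for ch in text:
--         if ch == "$" or ch == "%":
--             return True
--         if ch.isdigit():
--             digits += 1
--             if digits == 20:
--                 return True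
--     return False
-- ===== Notes on version B (the rewrite author's own statement) =====
-- stated objective: alternative
-- what changed: Replaced three separate full scans (a digit-count comprehension plus two substring membership tests) with a single early-exit pass that keeps a digit counter; same asymptotic cost, not measurably faster in CPython.
import Mathlib
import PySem

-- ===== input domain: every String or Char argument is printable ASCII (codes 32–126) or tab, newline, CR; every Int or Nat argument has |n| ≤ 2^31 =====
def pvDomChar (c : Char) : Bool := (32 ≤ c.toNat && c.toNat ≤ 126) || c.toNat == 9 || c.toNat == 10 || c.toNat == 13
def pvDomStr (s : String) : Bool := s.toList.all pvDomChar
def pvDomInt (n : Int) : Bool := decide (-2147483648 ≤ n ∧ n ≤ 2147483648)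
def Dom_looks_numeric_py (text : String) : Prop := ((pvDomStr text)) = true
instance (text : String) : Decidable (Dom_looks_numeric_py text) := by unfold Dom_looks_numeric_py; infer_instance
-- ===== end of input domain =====

-- B: single early-exit pass with a digit counter instead of A's three full scans (alternative decomposition, same cost).
-- ===== PORT A =====
def looks_numeric_py (text : String) : Bool :=
  if text.toList = [] then false
  else
    let digits := (text.toList.map (fun ch => if PySem.Chars.isdigit ch then (1:Nat) else 0)).sum
    if 20 ≤ digits then true
    else if text.toList.contains '$' || text.toList.contains '%' then true
    else false

-- ===== PORT B =====
def pvAltLoop : List Char → Nat → Bool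
  | [], _ => false
  | ch :: rest, digits =>
    if ch = '$' || ch = '%' then true
    else if PySem.Chars.isdigit ch then
      if digits + 1 = 20 then true else pvAltLoop rest (digits + 1)
    else pvAltLoop rest digits

def looks_numeric_py_alt (text : String) : Bool :=
  if text.toList = [] then false else pvAltLoop text.toList 0

-- ===== PRECONDITION & SPEC =====
def Spec_looks_numeric_py (text : String) (out : Bool) : Prop := out = looks_numeric_py_alt text
instance (text : String) (out : Bool) : Decidable (Spec_looks_numeric_py text out) := by unfold Spec_looks_numeric_py; infer_instance

-- ===== CLAIM (what is proved, stated in full; the proofs are below) =====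
def Claim_equal_looks_numeric_py : Prop := ∀ (text : String), Dom_looks_numeric_py text → Spec_looks_numeric_py text (looks_numeric_py text)

-- ===== LEMMAS AND PROOFS =====

-- ===== VERDICT (by name: the statement is the Claim_ definition above) =====
lemma pvAltLoop_eq (l : List Char) : ∀ (d : Nat), d < 20 →
    pvAltLoop l d =
      (decide (20 ≤ d + (l.map (fun ch => if PySem.Chars.isdigit ch then (1:Nat) else 0)).sum)
        || l.contains '$' || l.contains '%') := by
  induction l with
  | nil => intro d hd; simp [pvAltLoop]; omega
  | cons c rest ih =>
    intro d hd
    simp only [pvAltLoop, List.map_cons, List.sum_cons, List.contains_cons]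
    by_cases h1 : c = '$'
    · simp [h1]
    by_cases h2 : c = '%'
    · simp [h2]
    by_cases h3 : PySem.Chars.isdigit c
    · by_cases h4 : d + 1 = 20
      · have : 20 ≤ d + (1 + (rest.map (fun ch => if PySem.Chars.isdigit ch then (1:Nat) else 0)).sum) := by omega
        simp [h1, h2, h3, h4, this]
      · have hd' : d + 1 < 20 := by omega
        have e1 : ('$' == c) = false := beq_eq_false_iff_ne.mpr (fun h => h1 h.symm)
        have e2 : ('%' == c) = false := beq_eq_false_iff_ne.mpr (fun h => h2 h.symm)
        rw [ih (d+1) hd']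
        simp [h1, h2, h3, h4, e1, e2, Nat.add_assoc]
    · have e1 : ('$' == c) = false := beq_eq_false_iff_ne.mpr (fun h => h1 h.symm)
      have e2 : ('%' == c) = false := beq_eq_false_iff_ne.mpr (fun h => h2 h.symm)
      simp [h1, h2, h3, ih d hd, e1, e2]

theorem looks_numeric_py_spec : Claim_equal_looks_numeric_py := by
  intro text _
  unfold Spec_looks_numeric_py looks_numeric_py looks_numeric_py_alt
  by_cases h : text.toList = []
  · simp [h]
  · rw [if_neg h, if_neg h, pvAltLoop_eq _ 0 (by omega)]
    simp only [Nat.zero_add]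
    split_ifs with h1 h2 <;> (simp_all; try tauto)
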